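-- pv_equiv track=rewrite | github.com/droideck/patogith | lib/patogith/__init__.py | cleaup_references
-- ===== SOURCE A (Python) =====
-- NICKNAME_LIST = {
--     "mreynolds": "mreynolds389",
--     "lkrispen": "elkris",
--     "tbordaz": "tbordaz",
--     "firstyear": "Firstyear",
--     "mhonek": "kenoh",
--     "spichugi": "droideck",
--     "vashirov": "vashirov",
--     "nhosoi": "nhosoi",
--     "rmeggins": "richm",
--     "nkinder": "nkinder",
--     "edewata": "edewata",
--     "aborah": "aborah-sudo",
--     "amsharma": "amsharma3",
--     "ilias95": "ilstam",
--     "simo": "simo5",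
--     "rcritten": "rcritten",
--     "gparente": "germanparente",
-- }
--
-- def cleaup_references(content):
--     for nickname_pg, nickname_gh in NICKNAME_LIST.items():
--         content = content.replace(nickname_pg, nickname_gh)
--     if "#" in content:
--         i = 0
--         while True:
--             try:
--                 i = content.index("#", i)
--                 try:
--                     # We want to replace only the references to other issues/PRs
--                     int(content[i + 1])
--                     content = content[:i] + content[i + 1:]
--                 except ValueError:
--                     i = i + 1
--             except (IndexError, ValueError):
--                 break
--     content = content.replace("{{{", "```")
--     content = content.replace("}}}", "```")
--     return content
-- ===== SOURCE B (Python) =====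
-- NICKNAME_LIST = {
--     "mreynolds": "mreynolds389",
--     "lkrispen": "elkris",
--     "tbordaz": "tbordaz",
--     "firstyear": "Firstyear",
--     "mhonek": "kenoh",
--     "spichugi": "droideck",
--     "vashirov": "vashirov",
--     "nhosoi": "nhosoi",
--     "rmeggins": "richm",
--     "nkinder": "nkinder",
--     "edewata": "edewata",
--     "aborah": "aborah-sudo",
--     "amsharma": "amsharma3",
--     "ilias95": "ilstam",
--     "simo": "simo5",
--     "rcritten": "rcritten",
--     "gparente": "germanparente",
-- }
--
--
-- def cleaup_references(content):
--     for nickname_pg, nickname_gh in NICKNAME_LIST.items():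
--         content = content.replace(nickname_pg, nickname_gh)
--     # One pass with lookahead: drop each '#' that directly precedes a digit.
--     kept = [c for c, nxt in zip(content, content[1:]) if not (c == "#" and "0" <= nxt <= "9")]
--     content = "".join(kept) + content[-1:]
--     content = content.replace("{{{", "```")
--     content = content.replace("}}}", "```")
--     return content
-- ===== Notes on version B (the rewrite author's own statement) =====
-- stated objective: simpler
-- what changed: A's while-loop that repeatedly calls content.index(hash-sign, i) and rebuilds the string by slicing out one character at a time is replaced by a single left-to-right lookahead pass (zip of the string with its shifted self) that keeps every character except a hash sign directly followed by a digit.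
import Mathlib
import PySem

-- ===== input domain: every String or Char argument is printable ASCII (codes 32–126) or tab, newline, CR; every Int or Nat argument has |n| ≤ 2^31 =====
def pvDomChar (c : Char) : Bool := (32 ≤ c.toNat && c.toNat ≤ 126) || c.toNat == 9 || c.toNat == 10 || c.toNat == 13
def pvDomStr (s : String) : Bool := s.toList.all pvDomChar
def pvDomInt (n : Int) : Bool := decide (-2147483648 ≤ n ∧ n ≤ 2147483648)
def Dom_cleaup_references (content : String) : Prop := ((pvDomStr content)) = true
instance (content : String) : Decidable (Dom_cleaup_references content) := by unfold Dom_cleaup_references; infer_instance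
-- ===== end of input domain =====

-- B replaces A's index-jumping while-loop of in-place hash-sign deletions by a single
-- left-to-right lookahead pass (zip with the shifted string); simpler, same results.


-- ===== PORT A =====
-- NICKNAME_LIST.items() of the module-level dict literal (distinct keys, insertion order)
def pvNicknames : List (String × String) :=
  [("mreynolds", "mreynolds389"), ("lkrispen", "elkris"), ("tbordaz", "tbordaz"),
   ("firstyear", "Firstyear"), ("mhonek", "kenoh"), ("spichugi", "droideck"),
   ("vashirov", "vashirov"), ("nhosoi", "nhosoi"), ("rmeggins", "richm"),
   ("nkinder", "nkinder"), ("edewata", "edewata"), ("aborah", "aborah-sudo"),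
   ("amsharma", "amsharma3"), ("ilias95", "ilstam"), ("simo", "simo5"),
   ("rcritten", "rcritten"), ("gparente", "germanparente")]

-- termination helper for the while-loop: a successful content.index("#", i) is ≥ i and needs i ≤ len
theorem pvFindFrom_ge (s sub : List Char) (i : Nat)
    (h : PySem.Chars.findFrom s sub (i : Int) ≠ -1) :
    (i : Int) ≤ PySem.Chars.findFrom s sub (i : Int) ∧ i ≤ s.length := by
  by_cases hi : i ≤ s.length
  · exact ⟨(PySem.Chars.findFrom_natCast_spec s sub i hi h).1, hi⟩
  · exfalso; apply h
    simp only [PySem.Chars.findFrom]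
    split_ifs with h1 <;> omega

-- termination measures for the while-loop, proved separately (named, so the loop body stays small)
theorem pvLoopA_dec1 (content : List Char) (i : Nat)
    (hj : ¬ PySem.Chars.findFrom content ['#'] (i : Int) = -1)
    {c : Char} (hg : PySem.List.pyGet? content (PySem.Chars.findFrom content ['#'] (i : Int) + 1) = some c) :
    (PySem.List.slice content none (some (PySem.Chars.findFrom content ['#'] (i : Int))) ++
        PySem.List.slice content (some (PySem.Chars.findFrom content ['#'] (i : Int) + 1)) none).length + 1 -
      (PySem.Chars.findFrom content ['#'] (i : Int)).toNat < content.length + 1 - i := by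
  obtain ⟨h1, h2⟩ := pvFindFrom_ge content ['#'] i hj
  have hir : PySem.Raise.InRange content.length (PySem.Chars.findFrom content ['#'] (i : Int) + 1) := by
    by_contra hc
    rw [← PySem.List.pyGet?_eq_none_iff content _] at hc
    rw [hc] at hg; simp at hg
  obtain ⟨hlo, hhi⟩ := hir
  rw [PySem.List.slice_to content (by omega), PySem.List.slice_from content (by omega)]
  simp only [List.length_append, List.length_take, List.length_drop]
  omega

theorem pvLoopA_dec2 (content : List Char) (i : Nat)
    (hj : ¬ PySem.Chars.findFrom content ['#'] (i : Int) = -1)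
    {c : Char} (hg : PySem.List.pyGet? content (PySem.Chars.findFrom content ['#'] (i : Int) + 1) = some c) :
    content.length + 1 - ((PySem.Chars.findFrom content ['#'] (i : Int)).toNat + 1) < content.length + 1 - i := by
  obtain ⟨h1, h2⟩ := pvFindFrom_ge content ['#'] i hj
  have hir : PySem.Raise.InRange content.length (PySem.Chars.findFrom content ['#'] (i : Int) + 1) := by
    by_contra hc
    rw [← PySem.List.pyGet?_eq_none_iff content _] at hc
    rw [hc] at hg; simp at hg
  obtain ⟨hlo, hhi⟩ := hir
  omega

-- A's while-loop: i = content.index("#", i); int(content[i+1]) decides delete-or-advance;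
-- index ValueError / IndexError break.  content[:i] + content[i+1:] are the two slices.
def pvLoopA (content : List Char) (i : Nat) : List Char :=
  let j := PySem.Chars.findFrom content ['#'] (i : Int)
  if hj : j = -1 then content                                  -- ValueError from index → break
  else
    match hg : PySem.List.pyGet? content (j + 1) with
    | none => content                                          -- IndexError from content[i+1] → break
    | some c =>
      if (PySem.Int.ofChars? [c]).isSome                       -- int(content[i+1]) succeeded?
      then pvLoopA (PySem.List.slice content none (some j) ++
                    PySem.List.slice content (some (j + 1)) none) j.toNat
      else pvLoopA content (j.toNat + 1)
termination_by content.length + 1 - i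
decreasing_by
  · exact pvLoopA_dec1 content i hj hg
  · exact pvLoopA_dec2 content i hj hg

def cleaup_references (content : String) : String :=
  let content := pvNicknames.foldl (fun s p => PySem.Str.replace s p.1 p.2) content
  let content :=
    if PySem.Str.isIn "#" content                              -- if "#" in content:
    then String.ofList (pvLoopA content.toList 0)
    else content
  let content := PySem.Str.replace content "{{{" "```"
  let content := PySem.Str.replace content "}}}" "```"
  content

-- ===== PORT B =====
-- not (c == "#" and "0" <= nxt <= "9")  on single characters = code-point comparison
def pvDel (c nxt : Char) : Bool := c == '#' && (decide ('0' ≤ nxt) && decide (nxt ≤ '9'))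

def cleaup_references_alt (content : String) : String :=
  let content := pvNicknames.foldl (fun s p => PySem.Str.replace s p.1 p.2) content
  let cs := content.toList
  -- [c for c, nxt in zip(content, content[1:]) if not (c == "#" and "0" <= nxt <= "9")]
  let kept := ((cs.zip (PySem.List.slice cs (some 1) none)).filter (fun p => !pvDel p.1 p.2)).map Prod.fst
  -- "".join(kept) + content[-1:]
  let content := String.ofList (kept ++ PySem.List.slice cs (some (-1)) none)
  let content := PySem.Str.replace content "{{{" "```"
  let content := PySem.Str.replace content "}}}" "```"
  content

-- ===== PRECONDITION & SPEC =====
def Spec_cleaup_references (content : String) (out : String) : Prop := out = cleaup_references_alt content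
instance (content : String) (out : String) : Decidable (Spec_cleaup_references content out) := by unfold Spec_cleaup_references; infer_instance

-- ===== CLAIM (what is proved, stated in full; the proofs are below) =====
def Claim_equal_cleaup_references : Prop := ∀ (content : String), Dom_cleaup_references content → Spec_cleaup_references content (cleaup_references content)

-- ===== LEMMAS AND PROOFS =====

-- the common specification of the '#'-deletion: drop each '#' directly followed by a digit
def pvStrip : List Char → List Char
  | [] => []
  | [c] => [c]
  | c :: d :: rest => if pvDel c d then pvStrip (d :: rest) else c :: pvStrip (d :: rest)

theorem pvStrip_cons_ne (c : Char) (t : List Char) (h : c ≠ '#') :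
    pvStrip (c :: t) = c :: pvStrip t := by
  cases t with
  | nil => rfl
  | cons d r => simp [pvStrip, pvDel, h]

theorem pvStrip_append_free (mid xs : List Char) (h : ∀ c ∈ mid, c ≠ '#') :
    pvStrip (mid ++ xs) = mid ++ pvStrip xs := by
  induction mid with
  | nil => rfl
  | cons c t ih =>
      have hc : c ≠ '#' := h c (by simp)
      simp only [List.cons_append]
      rw [pvStrip_cons_ne c (t ++ xs) hc, ih (fun d hd => h d (by simp [hd]))]

theorem pvSingleton_prefix (c : Char) (l : List Char) : [c] <+: l ↔ l.head? = some c := by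
  cases l with
  | nil => simp
  | cons x t => simp [List.cons_prefix_cons, eq_comm]

-- in PySem's model, int(single char) succeeds exactly on '0'..'9' for characters below 128
theorem pvDigitEq (c : Char) (h : c.toNat < 128) :
    (PySem.Int.ofChars? [c]).isSome = (decide ('0' ≤ c) && decide (c ≤ '9')) := by
  have h2 : ∀ n : Fin 128, (PySem.Int.ofChars? [Char.ofNat (n : Nat)]).isSome =
      (decide ('0' ≤ Char.ofNat (n : Nat)) && decide (Char.ofNat (n : Nat) ≤ '9')) := by decide
  have := h2 ⟨c.toNat, h⟩
  simpa [Char.ofNat_toNat] using this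

-- characters produced by str.replace come from the string or the replacement
theorem pvMem_replace_go (old new : List Char) (fuel : Nat) (l acc : List Char) (c : Char)
    (h : c ∈ PySem.Chars.replace.go old new fuel l acc) : c ∈ acc ∨ c ∈ l ∨ c ∈ new := by
  induction fuel generalizing l acc with
  | zero => simp only [PySem.Chars.replace.go] at h; rcases List.mem_append.mp h with h | h
            · exact Or.inl (List.mem_reverse.mp h)
            · exact Or.inr (Or.inl h)
  | succ n ih =>
      cases l with
      | nil => simp only [PySem.Chars.replace.go] at h; exact Or.inl (List.mem_reverse.mp h)
      | cons x t =>
          simp only [PySem.Chars.replace.go] at h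
          split at h
          · rcases ih _ _ h with h | h | h
            · rcases List.mem_append.mp h with h | h
              · exact Or.inr (Or.inr (List.mem_reverse.mp h))
              · exact Or.inl h
            · exact Or.inr (Or.inl (List.mem_of_mem_drop h))
            · exact Or.inr (Or.inr h)
          · rcases ih _ _ h with h | h | h
            · rcases List.mem_cons.mp h with h | h
              · exact Or.inr (Or.inl (by simp [h]))
              · exact Or.inl h
            · exact Or.inr (Or.inl (List.mem_cons_of_mem _ h))
            · exact Or.inr (Or.inr h)

def pvAscii (cs : List Char) : Prop := ∀ c ∈ cs, c.toNat < 128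

theorem pvAscii_replace (s old new : List Char) (hs : pvAscii s) (hn : pvAscii new) :
    pvAscii (PySem.Chars.replace s old new) := by
  intro c hc
  unfold PySem.Chars.replace at hc
  split at hc
  · rcases List.mem_append.mp hc with h | h
    · exact hn c h
    · rcases List.mem_flatMap.mp h with ⟨d, hd, hcd⟩
      rcases List.mem_cons.mp hcd with h | h
      · exact h ▸ hs d hd
      · exact hn c h
  · rcases pvMem_replace_go old new s.length s [] c hc with h | h | h
    · simp at h
    · exact hs c h
    · exact hn c h

theorem pvAscii_foldl (ps : List (String × String)) (s : String)
    (hps : ∀ p ∈ ps, pvAscii p.2.toList) (hs : pvAscii s.toList) :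
    pvAscii (ps.foldl (fun s p => PySem.Str.replace s p.1 p.2) s).toList := by
  induction ps generalizing s with
  | nil => exact hs
  | cons p t ih =>
      refine ih _ (fun q hq => hps q (by simp [hq])) ?_
      rw [PySem.Str.toList_replace]
      exact pvAscii_replace _ _ _ hs (hps p (by simp))

-- B's pass computes pvStrip
theorem pvAlt_eq (cs : List Char) :
    ((cs.zip (PySem.List.slice cs (some 1) none)).filter (fun p => !pvDel p.1 p.2)).map Prod.fst ++
      PySem.List.slice cs (some (-1)) none = pvStrip cs := by
  rw [PySem.List.slice_from_one, PySem.List.slice_from_neg_one]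
  induction cs with
  | nil => rfl
  | cons c t ih =>
      cases t with
      | nil => simp [pvStrip]
      | cons d r =>
          simp only [List.tail_cons] at ih ⊢
          have hdrop : List.drop ((c :: d :: r).length - 1) (c :: d :: r) =
              List.drop ((d :: r).length - 1) (d :: r) := by simp
          rw [hdrop]
          simp only [List.zip_cons_cons, List.filter_cons]
          by_cases hdel : pvDel c d
          · simp only [hdel, Bool.not_true]
            rw [show pvStrip (c :: d :: r) = pvStrip (d :: r) by simp [pvStrip, hdel]]
            simpa using ih
          · simp only [Bool.not_eq_true] at hdel
            simp only [hdel, Bool.not_false, if_pos, List.map_cons, List.cons_append]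
            rw [show pvStrip (c :: d :: r) = c :: pvStrip (d :: r) by simp [pvStrip, hdel]]
            simpa using ih

-- A's loop computes pvStrip on the unprocessed suffix
theorem pvMidFree (cs : List Char) (i j : Nat)
    (hmin : ∀ m : Nat, i ≤ m → m < j → ¬ ['#'] <+: cs.drop m) :
    ∀ c ∈ (cs.drop i).take (j - i), c ≠ '#' := by
  intro c hc
  obtain ⟨m, hm, hget⟩ := List.getElem_of_mem hc
  have hm1 : m < j - i := lt_of_lt_of_le hm (by simp [List.length_take])
  have hm2 : i + m < cs.length := by
    have := hm; simp [List.length_take, List.length_drop] at this; omega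
  intro hch
  apply hmin (i + m) (by omega) (by omega)
  rw [pvSingleton_prefix, List.head?_drop, List.getElem?_eq_getElem hm2]
  rw [List.getElem_take, List.getElem_drop] at hget
  rw [hget, hch]

theorem pvFound (cs : List Char) (i : Nat)
    (hj : PySem.Chars.findFrom cs ['#'] (i : Int) ≠ -1) :
    ∃ j : Nat, PySem.Chars.findFrom cs ['#'] (i : Int) = (j : Int) ∧ i ≤ j ∧ j < cs.length ∧
      cs.drop j = '#' :: cs.drop (j + 1) ∧ (∀ c ∈ (cs.drop i).take (j - i), c ≠ '#') := by
  obtain ⟨h1, h2⟩ := pvFindFrom_ge cs ['#'] i hj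
  obtain ⟨-, hpre, hmin⟩ := PySem.Chars.findFrom_natCast_spec cs ['#'] i h2 hj
  refine ⟨(PySem.Chars.findFrom cs ['#'] (i : Int)).toNat, by omega, by omega, ?_, ?_, ?_⟩
  · rcases hpre with ⟨t, ht⟩
    have := congrArg List.length ht
    simp [List.length_drop] at this ⊢
    omega
  · rcases hpre with ⟨t, ht⟩
    have hlt : (PySem.Chars.findFrom cs ['#'] (i : Int)).toNat < cs.length := by
      have := congrArg List.length ht
      simp [List.length_drop] at this
      omega
    rw [List.drop_eq_getElem_cons hlt]
    have : (List.drop (PySem.Chars.findFrom cs ['#'] (i : Int)).toNat cs).head? = some '#' := by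
      rw [← ht]; simp
    rw [List.head?_drop, List.getElem?_eq_getElem hlt] at this
    simp at this
    simp [this]
  · exact pvMidFree cs i _ (fun m hm1 hm2 => hmin m hm1 hm2)

theorem pvLoopA_eq (cs : List Char) (i : Nat) (ha : pvAscii cs) :
    pvLoopA cs i = cs.take i ++ pvStrip (cs.drop i) := by
  induction cs, i using pvLoopA.induct with
  | case1 cs i j hj =>
      -- content.index raised: no '#' at or after i
      by_cases hi : i ≤ cs.length
      · rw [pvLoopA, dif_pos hj]
        have hno : ¬ ['#'] <:+: cs.drop i :=
          (PySem.Chars.findFrom_natCast_eq_neg_one_iff cs ['#'] i hi).mp hj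
        have hfree : ∀ c ∈ cs.drop i, c ≠ '#' := by
          intro c hc hch
          exact hno (hch ▸ (List.singleton_infix_iff c _).mpr hc)
        rw [show pvStrip (cs.drop i) = cs.drop i by
          have := pvStrip_append_free (cs.drop i) [] hfree
          simpa [pvStrip] using this]
        exact (List.take_append_drop i cs).symm
      · rw [pvLoopA, dif_pos hj]
        rw [List.drop_eq_nil_of_le (by omega), List.take_of_length_le (by omega)]
        simp [pvStrip]
  | case2 cs i j hj hg =>
      -- content[i+1] raised IndexError: the found '#' is the last character
      rw [pvLoopA, dif_neg hj, hg]
      obtain ⟨k, hk, h1, h2, h3, h4⟩ := pvFound cs i hj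
      rw [PySem.List.pyGet?_eq_none_iff] at hg
      have hk' : j = (k : Int) := hk
      have hlen : k + 1 = cs.length := by
        simp only [PySem.Raise.InRange, not_and, not_lt] at hg
        rw [hk'] at hg
        have := hg (by push_cast; omega)
        omega
      have hnil : cs.drop (k + 1) = [] := List.drop_eq_nil_of_le (by omega)
      have hsplit : cs.drop i = (cs.drop i).take (k - i) ++ ['#'] := by
        conv_lhs => rw [← List.take_append_drop (k - i) (cs.drop i)]
        rw [List.drop_drop, show i + (k - i) = k by omega, h3, hnil]
      rw [show pvStrip (cs.drop i) = cs.drop i by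
        conv_lhs => rw [hsplit]
        rw [pvStrip_append_free _ _ h4]
        conv_rhs => rw [hsplit]
        rfl]
      exact (List.take_append_drop i cs).symm
  | case3 cs i j hj c hg hdig ih =>
      rw [pvLoopA, dif_neg hj, hg]
      split
      next heq => exact absurd heq (by simp)
      next c' heq =>
        obtain rfl : c = c' := by injection heq
        rw [if_pos hdig]
        obtain ⟨k, hk, h1, h2, h3, h4⟩ := pvFound cs i hj
        have hk' : j = (k : Int) := hk
        have hg' : cs[k + 1]? = some c := by
          have h := hg
          rw [hk', show ((k : Int) + 1) = ((k + 1 : Nat) : Int) by push_cast; ring,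
            PySem.List.pyGet?_natCast] at h
          exact h
        obtain ⟨hk1, hck⟩ := List.getElem?_eq_some_iff.mp hg'
        have hdropk1 : cs.drop (k + 1) = c :: cs.drop (k + 2) := by
          rw [List.drop_eq_getElem_cons hk1, hck]
        have hnew : PySem.List.slice cs none (some j) ++ PySem.List.slice cs (some (j + 1)) none =
            cs.take k ++ cs.drop (k + 1) := by
          rw [hk', PySem.List.slice_to cs (by omega), PySem.List.slice_from cs (by omega)]
          norm_num
        have htl : (cs.take k).length = k := by simp; omega
        have hihp : pvAscii (PySem.List.slice cs none (some j) ++ PySem.List.slice cs (some (j + 1)) none) := by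
          rw [hnew]; intro d hd
          rcases List.mem_append.mp hd with h | h
          · exact ha d (List.mem_of_mem_take h)
          · exact ha d (List.mem_of_mem_drop h)
        have IH := ih hihp
        rw [hnew, hk', Int.toNat_natCast] at IH
        rw [show PySem.Chars.findFrom cs ['#'] (i : Int) = (k : Int) from hk]
        rw [Int.toNat_natCast]
        rw [show PySem.List.slice cs none (some ((k : Int))) ++ PySem.List.slice cs (some ((k : Int) + 1)) none =
            cs.take k ++ cs.drop (k + 1) by
          rw [PySem.List.slice_to cs (by omega), PySem.List.slice_from cs (by omega)]; norm_num]
        rw [IH, List.take_left' htl, List.drop_left' htl]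
        -- right-hand side: split drop i at the found '#'
        have hdropi : cs.drop i = (cs.drop i).take (k - i) ++ '#' :: cs.drop (k + 1) := by
          conv_lhs => rw [← List.take_append_drop (k - i) (cs.drop i)]
          rw [List.drop_drop, show i + (k - i) = k by omega, h3]
        have hdel : pvDel '#' c = true := by
          have hac : c.toNat < 128 := ha c (hck ▸ List.getElem_mem hk1)
          simp only [pvDel, beq_self_eq_true, Bool.true_and]
          rw [← pvDigitEq c hac]; exact hdig
        have hstrip : pvStrip (cs.drop i) = (cs.drop i).take (k - i) ++ pvStrip (cs.drop (k + 1)) := by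
          conv_lhs => rw [hdropi]
          rw [pvStrip_append_free _ _ h4, hdropk1]
          simp only [pvStrip, hdel, if_pos]
        rw [hstrip, show cs.take k = cs.take i ++ (cs.drop i).take (k - i) by
          conv_lhs => rw [show k = i + (k - i) by omega, List.take_add]]
        simp [List.append_assoc]
  | case4 cs i j hj c hg hdig ih =>
      rw [pvLoopA, dif_neg hj, hg]
      split
      next heq => exact absurd heq (by simp)
      next c' heq =>
        obtain rfl : c = c' := by injection heq
        rw [if_neg hdig]
        obtain ⟨k, hk, h1, h2, h3, h4⟩ := pvFound cs i hj
        have hk' : j = (k : Int) := hk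
        have hg' : cs[k + 1]? = some c := by
          have h := hg
          rw [hk', show ((k : Int) + 1) = ((k + 1 : Nat) : Int) by push_cast; ring,
            PySem.List.pyGet?_natCast] at h
          exact h
        obtain ⟨hk1, hck⟩ := List.getElem?_eq_some_iff.mp hg'
        have hdropk1 : cs.drop (k + 1) = c :: cs.drop (k + 2) := by
          rw [List.drop_eq_getElem_cons hk1, hck]
        have IH := ih ha
        rw [hk', Int.toNat_natCast] at IH
        rw [show PySem.Chars.findFrom cs ['#'] (i : Int) = (k : Int) from hk]
        rw [Int.toNat_natCast]
        rw [IH]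
        have hdel : pvDel '#' c = false := by
          have hac : c.toNat < 128 := ha c (hck ▸ List.getElem_mem hk1)
          simp only [pvDel, beq_self_eq_true, Bool.true_and]
          rw [← pvDigitEq c hac]
          simpa using hdig
        have hdropi : cs.drop i = (cs.drop i).take (k - i) ++ '#' :: cs.drop (k + 1) := by
          conv_lhs => rw [← List.take_append_drop (k - i) (cs.drop i)]
          rw [List.drop_drop, show i + (k - i) = k by omega, h3]
        have hstrip : pvStrip (cs.drop i) = (cs.drop i).take (k - i) ++ '#' :: pvStrip (cs.drop (k + 1)) := by
          conv_lhs => rw [hdropi]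
          rw [pvStrip_append_free _ _ h4, hdropk1]
          simp only [pvStrip, hdel, Bool.false_eq_true, if_false]
        have htake : cs.take (k + 1) = cs.take i ++ ((cs.drop i).take (k - i) ++ ['#']) := by
          rw [show k + 1 = i + ((k - i) + 1) by omega, List.take_add]
          congr 1
          rw [List.take_add, List.drop_drop, show i + (k - i) = k by omega]
          congr 1
          rw [h3]; rfl
        rw [hstrip, htake]
        simp [List.append_assoc]

-- ===== VERDICT (by name: the statement is the Claim_ definition above) =====
theorem cleaup_references_spec : Claim_equal_cleaup_references := by
  intro content hdom
  unfold Spec_cleaup_references cleaup_references cleaup_references_alt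
  have has : pvAscii (pvNicknames.foldl (fun s p => PySem.Str.replace s p.1 p.2) content).toList := by
    have hall : pvNicknames.all (fun p => p.2.toList.all (fun c => decide (c.toNat < 128))) = true := by
      decide
    refine pvAscii_foldl pvNicknames content ?_ ?_
    · intro p hp c hc
      have h1 := List.all_eq_true.mp hall p hp
      have h2 := List.all_eq_true.mp h1 c hc
      simpa using h2
    intro c hc
    have := List.all_eq_true.mp hdom c hc
    simp only [pvDomChar, Bool.or_eq_true, Bool.and_eq_true, decide_eq_true_eq, beq_iff_eq] at this
    omega
  set s := pvNicknames.foldl (fun s p => PySem.Str.replace s p.1 p.2) content with hs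
  have hloop : pvLoopA s.toList 0 = pvStrip s.toList := by
    simpa using pvLoopA_eq s.toList 0 has
  have hmid : (if PySem.Str.isIn "#" s then String.ofList (pvLoopA s.toList 0) else s) =
      String.ofList
        (((s.toList.zip (PySem.List.slice s.toList (some 1) none)).filter
            (fun p => !pvDel p.1 p.2)).map Prod.fst ++ PySem.List.slice s.toList (some (-1)) none) := by
    rw [pvAlt_eq s.toList]
    by_cases hin : PySem.Str.isIn "#" s
    · rw [if_pos hin, hloop]
    · rw [if_neg hin]
      have hno : ¬ ['#'] <:+: s.toList := by
        rw [Bool.not_eq_true] at hin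
        rw [PySem.Str.isIn_eq] at hin
        exact (PySem.Chars.isIn_eq_false_iff _ _).mp (by simpa using hin)
      have hfree : ∀ c ∈ s.toList, c ≠ '#' := by
        intro c hc hch
        exact hno (hch ▸ (List.singleton_infix_iff c _).mpr hc)
      rw [show pvStrip s.toList = s.toList by
        have := pvStrip_append_free s.toList [] hfree
        simpa [pvStrip] using this]
      exact String.ofList_toList.symm
  simp only [hmid]
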